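-- pv_equiv track=rewrite | github.com/papysans/Morpheus | backend/core/chapter_craft.py | build_outline_phase_hints
-- ===== SOURCE A (Python) =====
-- from typing import Any, Dict, List, Optional, Set
--
-- def build_outline_phase_hints(chapter_count: int, continuation_mode: bool) -> List[Dict[str, str]]:
--     total = max(1, int(chapter_count or 1))
--     hints: List[Dict[str, str]] = []
--
--     for idx in range(total):
--         position = (idx + 1) / total
--         if continuation_mode:
--             if position <= 0.3:
--                 phase = "起势递进"
--                 focus = "引入新异常并绑定角色目标"
--             elif position <= 0.7:
--                 phase = "代价扩张"
--                 focus = "冲突升级且代价外溢，避免主线完结"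
--             else:
--                 phase = "阶段收束"
--                 focus = "回收局部伏笔并留下更大钩子"
--         else:
--             if position <= 0.2:
--                 phase = "铺设与触发"
--                 focus = "建立核心问题与关键人物立场"
--             elif position <= 0.55:
--                 phase = "压力升级"
--                 focus = "连续决策导致局势恶化"
--             elif position <= 0.85:
--                 phase = "反转与逼近"
--                 focus = "揭露误导并逼近核心真相"
--             else:
--                 phase = "收束与续钩"
--                 focus = "兑现局部结果并留下后续驱动力"
--
--         hints.append(
--             {
--                 "chapter_index": str(idx + 1),
--                 "phase": phase,
--                 "focus": focus,
--             }
--         )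
--
--     return hints
-- ===== SOURCE B (Python) =====
-- def build_outline_phase_hints(chapter_count, continuation_mode):
--     total = max(1, int(chapter_count or 1))
--     # Band boundaries computed once with exact integer arithmetic: chapter i (1-based)
--     # belongs to the first band whose boundary is >= i; boundary for cutoff p/q is (p*total)//q.
--     if continuation_mode:
--         bands = [
--             (3 * total // 10, "起势递进", "引入新异常并绑定角色目标"),
--             (7 * total // 10, "代价扩张", "冲突升级且代价外溢，避免主线完结"),
--             (total, "阶段收束", "回收局部伏笔并留下更大钩子"),
--         ]
--     else:
--         bands = [
--             (total // 5, "铺设与触发", "建立核心问题与关键人物立场"),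
--             (55 * total // 100, "压力升级", "连续决策导致局势恶化"),
--             (85 * total // 100, "反转与逼近", "揭露误导并逼近核心真相"),
--             (total, "收束与续钩", "兑现局部结果并留下后续驱动力"),
--         ]
--     hints = []
--     start = 0
--     for end, phase, focus in bands:
--         hints += [
--             {"chapter_index": str(i + 1), "phase": phase, "focus": focus}
--             for i in range(start, end)
--         ]
--         start = end
--     return hints
-- ===== Notes on version B (the rewrite author's own statement) =====
-- stated objective: alternative
-- what changed: B computes each phase's chapter-boundary once as an exact integer floor ((p*total)//q) and emits each phase's chapters as one run (a comprehension per band), instead of A's per-chapter float position and repeated if/elif cutoff ladder.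
import Mathlib
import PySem

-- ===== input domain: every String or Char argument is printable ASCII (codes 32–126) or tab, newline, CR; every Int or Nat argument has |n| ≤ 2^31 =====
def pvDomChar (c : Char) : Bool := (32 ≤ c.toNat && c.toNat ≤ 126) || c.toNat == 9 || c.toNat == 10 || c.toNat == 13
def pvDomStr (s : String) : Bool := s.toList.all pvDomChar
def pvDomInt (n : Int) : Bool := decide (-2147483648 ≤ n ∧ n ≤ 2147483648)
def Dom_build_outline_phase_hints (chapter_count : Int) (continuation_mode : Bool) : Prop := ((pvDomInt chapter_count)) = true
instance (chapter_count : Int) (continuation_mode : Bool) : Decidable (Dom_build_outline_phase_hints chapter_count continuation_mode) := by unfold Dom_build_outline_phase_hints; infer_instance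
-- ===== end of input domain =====

-- B replaces the per-chapter float if/elif ladder by per-phase integer band boundaries computed once,
-- emitting each phase's chapters as one run (a comprehension per band); same O(n) cost, different structure.

-- ===== PORT A =====
-- The if/elif ladder of A, one row per idx.  The float test `(idx+1)/total <= c` (c = 0.3, 0.7, 0.2,
-- 0.55, 0.85) is ported as the exact rational comparison (e.g. `(idx+1)*10 ≤ 3*total`): for
-- 1 ≤ total ≤ 2^31 (the stated domain) the spacing of the fractions (≥ 1/(100·2^31)) dwarfs both the
-- double rounding error of the division and the representation error of the literals, so the two
-- comparisons agree; this is exact on Dom.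
def pvRowA (continuation_mode : Bool) (total idx : Int) : List (String × String) :=
  let pf : String × String :=
    if continuation_mode then
      if (idx + 1) * 10 ≤ 3 * total then ("起势递进", "引入新异常并绑定角色目标")
      else if (idx + 1) * 10 ≤ 7 * total then ("代价扩张", "冲突升级且代价外溢，避免主线完结")
      else ("阶段收束", "回收局部伏笔并留下更大钩子")
    else
      if (idx + 1) * 5 ≤ total then ("铺设与触发", "建立核心问题与关键人物立场")
      else if (idx + 1) * 100 ≤ 55 * total then ("压力升级", "连续决策导致局势恶化")
      else if (idx + 1) * 100 ≤ 85 * total then ("反转与逼近", "揭露误导并逼近核心真相")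
      else ("收束与续钩", "兑现局部结果并留下后续驱动力")
  [("chapter_index", PySem.Int.toStr (idx + 1)), ("phase", pf.1), ("focus", pf.2)]

def build_outline_phase_hints (chapter_count : Int) (continuation_mode : Bool) : List (List (String × String)) :=
  let total := max 1 (if chapter_count == 0 then (1 : Int) else chapter_count)
  (PySem.List.pyRange 0 total 1).foldl
    (fun hints idx => hints ++ [pvRowA continuation_mode total idx]) []

-- ===== PORT B =====
def pvRowB (i : Int) (phase focus : String) : List (String × String) :=
  [("chapter_index", PySem.Int.toStr (i + 1)), ("phase", phase), ("focus", focus)]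

def build_outline_phase_hints_alt (chapter_count : Int) (continuation_mode : Bool) : List (List (String × String)) :=
  let total := max 1 (if chapter_count == 0 then (1 : Int) else chapter_count)
  let bands : List (Int × String × String) :=
    if continuation_mode then
      [(PySem.Int.floordiv (3 * total) 10, "起势递进", "引入新异常并绑定角色目标"),
       (PySem.Int.floordiv (7 * total) 10, "代价扩张", "冲突升级且代价外溢，避免主线完结"),
       (total, "阶段收束", "回收局部伏笔并留下更大钩子")]
    else
      [(PySem.Int.floordiv total 5, "铺设与触发", "建立核心问题与关键人物立场"),
       (PySem.Int.floordiv (55 * total) 100, "压力升级", "连续决策导致局势恶化"),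
       (PySem.Int.floordiv (85 * total) 100, "反转与逼近", "揭露误导并逼近核心真相"),
       (total, "收束与续钩", "兑现局部结果并留下后续驱动力")]
  (bands.foldl
    (fun (st : List (List (String × String)) × Int) b =>
      (st.1 ++ (PySem.List.pyRange st.2 b.1 1).map (fun i => pvRowB i b.2.1 b.2.2), b.1))
    ([], 0)).1

-- ===== PRECONDITION & SPEC =====
def Spec_build_outline_phase_hints (chapter_count : Int) (continuation_mode : Bool) (out : List (List (String × String))) : Prop := out = build_outline_phase_hints_alt chapter_count continuation_mode
instance (chapter_count : Int) (continuation_mode : Bool) (out : List (List (String × String))) : Decidable (Spec_build_outline_phase_hints chapter_count continuation_mode out) := by unfold Spec_build_outline_phase_hints; infer_instance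

-- ===== CLAIM (what is proved, stated in full; the proofs are below) =====
def Claim_equal_build_outline_phase_hints : Prop := ∀ (chapter_count : Int) (continuation_mode : Bool), Dom_build_outline_phase_hints chapter_count continuation_mode → Spec_build_outline_phase_hints chapter_count continuation_mode (build_outline_phase_hints chapter_count continuation_mode)

-- ===== LEMMAS AND PROOFS =====

lemma pv_core (t : Int) (ht : 1 ≤ t) (cm : Bool) :
    (PySem.List.pyRange 0 t 1).foldl (fun hints idx => hints ++ [pvRowA cm t idx]) [] =
    ((if cm then
        [(PySem.Int.floordiv (3 * t) 10, "起势递进", "引入新异常并绑定角色目标"),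
         (PySem.Int.floordiv (7 * t) 10, "代价扩张", "冲突升级且代价外溢，避免主线完结"),
         (t, "阶段收束", "回收局部伏笔并留下更大钩子")]
      else
        [(PySem.Int.floordiv t 5, "铺设与触发", "建立核心问题与关键人物立场"),
         (PySem.Int.floordiv (55 * t) 100, "压力升级", "连续决策导致局势恶化"),
         (PySem.Int.floordiv (85 * t) 100, "反转与逼近", "揭露误导并逼近核心真相"),
         (t, "收束与续钩", "兑现局部结果并留下后续驱动力")] :
        List (Int × String × String)).foldl
      (fun (st : List (List (String × String)) × Int) b =>
        (st.1 ++ (PySem.List.pyRange st.2 b.1 1).map (fun i => pvRowB i b.2.1 b.2.2), b.1))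
      ([], 0)).1 := by
  have hd10 : PySem.Int.floordiv (3 * t) 10 = (3 * t) / 10 :=
    PySem.Int.floordiv_eq_ediv_of_pos (by norm_num)
  have hd10' : PySem.Int.floordiv (7 * t) 10 = (7 * t) / 10 :=
    PySem.Int.floordiv_eq_ediv_of_pos (by norm_num)
  have hd5 : PySem.Int.floordiv t 5 = t / 5 :=
    PySem.Int.floordiv_eq_ediv_of_pos (by norm_num)
  have hd55 : PySem.Int.floordiv (55 * t) 100 = (55 * t) / 100 :=
    PySem.Int.floordiv_eq_ediv_of_pos (by norm_num)
  have hd85 : PySem.Int.floordiv (85 * t) 100 = (85 * t) / 100 :=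
    PySem.Int.floordiv_eq_ediv_of_pos (by norm_num)
  cases cm
  · simp only [if_false, Bool.false_eq_true, List.foldl, hd5, hd55, hd85,
      PySem.List.foldl_append_singleton_eq_map, List.nil_append]
    rw [PySem.List.pyRange_one_append 0 (t / 5) t (by omega) (by omega),
        PySem.List.pyRange_one_append (t / 5) ((55 * t) / 100) t (by omega) (by omega),
        PySem.List.pyRange_one_append ((55 * t) / 100) ((85 * t) / 100) t (by omega) (by omega)]
    simp only [List.map_append, List.append_assoc]
    congr 1
    · refine List.map_congr_left (fun x hx => ?_)
      rw [PySem.List.mem_pyRange_one] at hx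
      simp only [pvRowA, pvRowB, Bool.false_eq_true, if_false, if_pos (show (x + 1) * 5 ≤ t by omega)]
    congr 1
    · refine List.map_congr_left (fun x hx => ?_)
      rw [PySem.List.mem_pyRange_one] at hx
      simp only [pvRowA, pvRowB, Bool.false_eq_true, if_false,
        if_neg (show ¬ (x + 1) * 5 ≤ t by omega),
        if_pos (show (x + 1) * 100 ≤ 55 * t by omega)]
    congr 1
    · refine List.map_congr_left (fun x hx => ?_)
      rw [PySem.List.mem_pyRange_one] at hx
      simp only [pvRowA, pvRowB, Bool.false_eq_true, if_false,
        if_neg (show ¬ (x + 1) * 5 ≤ t by omega),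
        if_neg (show ¬ (x + 1) * 100 ≤ 55 * t by omega),
        if_pos (show (x + 1) * 100 ≤ 85 * t by omega)]
    · refine List.map_congr_left (fun x hx => ?_)
      rw [PySem.List.mem_pyRange_one] at hx
      simp only [pvRowA, pvRowB, Bool.false_eq_true, if_false,
        if_neg (show ¬ (x + 1) * 5 ≤ t by omega),
        if_neg (show ¬ (x + 1) * 100 ≤ 55 * t by omega),
        if_neg (show ¬ (x + 1) * 100 ≤ 85 * t by omega)]
  · simp only [if_true, List.foldl, hd10, hd10',
      PySem.List.foldl_append_singleton_eq_map, List.nil_append]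
    rw [PySem.List.pyRange_one_append 0 ((3 * t) / 10) t (by omega) (by omega),
        PySem.List.pyRange_one_append ((3 * t) / 10) ((7 * t) / 10) t (by omega) (by omega)]
    simp only [List.map_append, List.append_assoc]
    congr 1
    · refine List.map_congr_left (fun x hx => ?_)
      rw [PySem.List.mem_pyRange_one] at hx
      simp only [pvRowA, pvRowB, if_true, if_pos (show (x + 1) * 10 ≤ 3 * t by omega)]
    congr 1
    · refine List.map_congr_left (fun x hx => ?_)
      rw [PySem.List.mem_pyRange_one] at hx
      simp only [pvRowA, pvRowB, if_true,
        if_neg (show ¬ (x + 1) * 10 ≤ 3 * t by omega),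
        if_pos (show (x + 1) * 10 ≤ 7 * t by omega)]
    · refine List.map_congr_left (fun x hx => ?_)
      rw [PySem.List.mem_pyRange_one] at hx
      simp only [pvRowA, pvRowB, if_true,
        if_neg (show ¬ (x + 1) * 10 ≤ 3 * t by omega),
        if_neg (show ¬ (x + 1) * 10 ≤ 7 * t by omega)]

-- ===== VERDICT (by name: the statement is the Claim_ definition above) =====
theorem build_outline_phase_hints_spec : Claim_equal_build_outline_phase_hints := by
  intro cc cm _
  unfold Spec_build_outline_phase_hints build_outline_phase_hints build_outline_phase_hints_alt
  exact pv_core _ (le_max_left _ _) cm
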